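-- pv_equiv track=rewrite | github.com/atasayin/beautiful-zeros | main.py | beautifulZeros
-- ===== SOURCE A (Python) =====
-- def beautifulZeros(n, k, Cost):
--     result = None
--     sol_idx = None
--
--     for i in range(0, k+1):
--         if (n - i -1) % (2*k + 1) <= k:
--             cost_i = 0
--             for j in range(i, n, 2*k+1):
--                 cost_i = cost_i + Cost[j]
--             if result is None:
--                 result = cost_i
--                 sol_idx = i
--             else:
--                 result = min(result, cost_i)
--                 if result == cost_i:
--                     sol_idx = i
--
--     return result, sol_idx
-- ===== SOURCE B (Python) =====
-- def beautifulZeros(n, k, Cost):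
--     if k < 0:
--         return None, None
--     s = 2 * k + 1
--     valid = [r for r in range(k + 1) if (n - r - 1) % s <= k]
--     valid_set = set(valid)
--     sums = {}
--     for j in range(n):
--         m = j % s
--         if m in valid_set:
--             sums[m] = sums.get(m, 0) + Cost[j]
--     best = None
--     idx = None
--     for r in valid:
--         c = sums.get(r, 0)
--         if best is None or c <= best:
--             best = c
--             idx = r
--     return best, idx
-- ===== Notes on version B (the rewrite author's own statement) =====
-- stated objective: alternative
-- what changed: Instead of A's outer loop over residues each re-scanning Cost with stride 2k+1, B precomputes the valid residues, makes one forward pass over range(n) accumulating Cost[j] into a per-residue sum dict, and finishes with a min-scan over the valid residues (keeping the largest residue on ties, like A).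
import Mathlib
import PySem

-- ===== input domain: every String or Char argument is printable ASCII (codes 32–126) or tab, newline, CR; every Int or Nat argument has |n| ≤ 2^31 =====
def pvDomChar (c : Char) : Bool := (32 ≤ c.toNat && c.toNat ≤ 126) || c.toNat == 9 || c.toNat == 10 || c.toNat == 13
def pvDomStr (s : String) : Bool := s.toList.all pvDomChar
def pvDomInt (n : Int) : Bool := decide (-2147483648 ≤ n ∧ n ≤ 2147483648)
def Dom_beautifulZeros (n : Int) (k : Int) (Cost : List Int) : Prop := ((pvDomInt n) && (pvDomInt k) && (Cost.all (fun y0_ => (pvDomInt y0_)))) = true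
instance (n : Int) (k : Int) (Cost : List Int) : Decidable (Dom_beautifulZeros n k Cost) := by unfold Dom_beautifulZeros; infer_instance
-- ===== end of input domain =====

-- B replaces A's per-residue strided rescans of Cost by one forward pass accumulating
-- per-residue sums in a dict, followed by a min-scan over the valid residues (objective: alternative).

-- ===== PORT A =====
-- cost_i of A's inner loop: for j in range(i, n, 2k+1): cost_i += Cost[j]
def bzCostA (n : Int) (k : Int) (Cost : List Int) (i : Int) : Int :=
  (PySem.List.pyRange i n (2*k+1)).foldl
    (fun c j => c + PySem.List.pyGetD Cost j 0) 0

def beautifulZeros (n : Int) (k : Int) (Cost : List Int) : Option Int × Option Int :=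
  (PySem.List.pyRange 0 (k+1) 1).foldl
    (fun st i =>
      if PySem.Int.mod (n - i - 1) (2*k+1) ≤ k then
        match st with
        | (none, _) => (some (bzCostA n k Cost i), some i)
        | (some r, sidx) =>
          (some (min r (bzCostA n k Cost i)),
           if min r (bzCostA n k Cost i) = bzCostA n k Cost i then some i else sidx)
      else st)
    (none, none)

-- ===== PORT B =====
-- valid = [r for r in range(k+1) if (n-r-1) % s <= k]
def bzValid (n : Int) (k : Int) : List Int :=
  (PySem.List.pyRange 0 (k+1) 1).filter
    (fun r => decide (PySem.Int.mod (n - r - 1) (2*k+1) ≤ k))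

-- sums: one forward pass over range(n), accumulating Cost[j] into sums[j % s] for valid residues
def bzSums (n : Int) (k : Int) (Cost : List Int) : PySem.Dict Int Int :=
  (PySem.List.pyRange 0 n 1).foldl
    (fun d j =>
      if PySem.Set.contains (PySem.Set.ofList (bzValid n k)) (PySem.Int.mod j (2*k+1)) then
        d.modify (PySem.Int.mod j (2*k+1)) 0 (fun v => v + PySem.List.pyGetD Cost j 0)
      else d)
    PySem.Dict.empty

def beautifulZeros_alt (n : Int) (k : Int) (Cost : List Int) : Option Int × Option Int :=
  if k < 0 then (none, none) else
  (bzValid n k).foldl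
    (fun st r =>
      let c := (bzSums n k Cost).getD r 0
      match st with
      | (none, _) => (some c, some r)
      | (some b, bidx) => if c ≤ b then (some c, some r) else (some b, bidx))
    (none, none)

-- ===== PRECONDITION & SPEC =====
-- Pre_ excludes exactly the inputs on which the Python A raises IndexError, i.e. some index
-- of a scanned (valid) residue class lies in [len(Cost), n).  The valid residues form one
-- interval [lo, hi] around t = (n-1) % (2k+1), so the raise test is constant-time arithmetic.
def bzRaise (n : Int) (k : Int) (L : Int) : Bool :=
  if k < 0 then false
  else if n ≤ L then false
  else
    let s := 2*k+1
    let t := PySem.Int.mod (n-1) s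
    let lo := if t ≤ k then 0 else t - k
    let hi := if t ≤ k then t else k
    let a := PySem.Int.mod L s
    if (a ≤ hi ∧ L - a + max lo a < n) ∨ (lo < a ∧ L + lo - a + s < n) then true else false

def Pre_beautifulZeros (n : Int) (k : Int) (Cost : List Int) : Prop :=
  bzRaise n k (Cost.length : Int) = false
instance (n : Int) (k : Int) (Cost : List Int) : Decidable (Pre_beautifulZeros n k Cost) := by
  unfold Pre_beautifulZeros; infer_instance

def pvWitness_beautifulZeros : Int × Int × List Int := (3, 1, [1, 2, 3])

def Spec_beautifulZeros (n : Int) (k : Int) (Cost : List Int) (out : Option Int × Option Int) : Prop := out = beautifulZeros_alt n k Cost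
instance (n : Int) (k : Int) (Cost : List Int) (out : Option Int × Option Int) : Decidable (Spec_beautifulZeros n k Cost out) := by unfold Spec_beautifulZeros; infer_instance

-- ===== CLAIM (what is proved, stated in full; the proofs are below) =====
def Claim_equal_beautifulZeros : Prop := ∀ (n : Int) (k : Int) (Cost : List Int), Dom_beautifulZeros n k Cost → Pre_beautifulZeros n k Cost → Spec_beautifulZeros n k Cost (beautifulZeros n k Cost)

-- ===== LEMMAS AND PROOFS =====

-- a guarded accumulate-into-dict loop, read back at a key the guard accepts
lemma getD_foldl_guard_modify_add (l : List Int) (key : Int → Int) (p : Int → Bool)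
    (g : Int → Int) (d : PySem.Dict Int Int) (m : Int) (hm : p m = true) :
    (l.foldl (fun d j => if p (key j) then d.modify (key j) 0 (fun v => v + g j) else d) d).getD m 0
      = d.getD m 0 + ((l.filter (fun j => decide (key j = m))).map g).sum := by
  induction l generalizing d with
  | nil => simp
  | cons j t ih =>
    simp only [List.foldl_cons, List.filter_cons]
    by_cases h : key j = m
    · rw [h, hm]
      simp only [if_true, decide_true, List.map_cons, List.sum_cons, ih,
        PySem.Dict.getD_modify]
      ring
    · have hd : (decide (key j = m)) = false := by simp [h]
      rw [hd]
      simp only [Bool.false_eq_true, if_false]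
      by_cases hp : p (key j) = true
      · rw [if_pos hp, ih, PySem.Dict.getD_modify, if_neg (fun hc => h hc.symm)]
      · rw [if_neg (by simp [hp]), ih]

-- the indices of residue class r in [0, n) are exactly range(r, n, s)
lemma filter_mod_pyRange (n s r : Int) (hs : 0 < s) (hr0 : 0 ≤ r) (hrs : r < s) :
    (PySem.List.pyRange 0 n 1).filter (fun j => decide (PySem.Int.mod j s = r))
      = PySem.List.pyRange r n s := by
  have hiff : ∀ j : Int, (0 ≤ j ∧ j < n ∧ PySem.Int.mod j s = r) ↔ (r ≤ j ∧ j < n ∧ s ∣ j - r) := by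
    intro j
    constructor
    · rintro ⟨h0, hn, hm⟩
      have hq := PySem.Int.floordiv_mul_add_mod j s
      have hqn : 0 ≤ PySem.Int.floordiv j s := by
        rw [PySem.Int.floordiv_eq_ediv_of_pos hs]
        exact Int.ediv_nonneg h0 (le_of_lt hs)
      refine ⟨?_, hn, ⟨PySem.Int.floordiv j s, ?_⟩⟩
      · nlinarith [hqn, hq, hm, hs]
      · rw [← hm]; linarith [hq]
    · rintro ⟨hr, hn, ⟨c, hc⟩⟩
      have hc0 : 0 ≤ c := by nlinarith [hs, hr, hc]
      refine ⟨le_trans hr0 hr, hn, ?_⟩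
      rw [PySem.Int.mod_eq_emod_of_pos hs]
      have hj : j = r + s * c := by linarith [hc]
      rw [hj, Int.add_mul_emod_self_left]
      exact Int.emod_eq_of_lt hr0 hrs
  have hpwL : ((PySem.List.pyRange 0 n 1).filter (fun j => decide (PySem.Int.mod j s = r))).Pairwise (· < ·) :=
    (PySem.List.pairwise_lt_pyRange_one 0 n).filter _
  have hpwR : (PySem.List.pyRange r n s).Pairwise (· < ·) := by
    rw [PySem.List.pyRange_of_pos r n hs]
    refine List.Pairwise.map _ ?_ List.pairwise_lt_range
    intro a b hab
    have hab' : (a : Int) < (b : Int) := by exact_mod_cast hab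
    nlinarith [hs]
  have hndL : ((PySem.List.pyRange 0 n 1).filter (fun j => decide (PySem.Int.mod j s = r))).Nodup :=
    hpwL.imp (fun h => ne_of_lt h)
  have hndR : (PySem.List.pyRange r n s).Nodup := hpwR.imp (fun h => ne_of_lt h)
  have hperm : ((PySem.List.pyRange 0 n 1).filter (fun j => decide (PySem.Int.mod j s = r))).Perm (PySem.List.pyRange r n s) := by
    rw [List.perm_ext_iff_of_nodup hndL hndR]
    intro j
    rw [List.mem_filter, PySem.List.mem_pyRange_one, PySem.List.mem_pyRange_iff_of_pos hs j,
      decide_eq_true_eq]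
    rw [← hiff j]
    tauto
  exact hperm.eq_of_pairwise (fun a b _ _ hab hba => absurd hba (lt_asymm hab)) hpwL hpwR

-- the accumulated sum of residue class r equals A's strided scan
lemma bzSums_getD (n : Int) (k : Int) (Cost : List Int) (r : Int) (hk : ¬ k < 0)
    (hr : r ∈ bzValid n k) :
    (bzSums n k Cost).getD r 0 = bzCostA n k Cost r := by
  have hs : (0:Int) < 2*k+1 := by omega
  have hr' := hr
  unfold bzValid at hr'
  rw [List.mem_filter, PySem.List.mem_pyRange_one] at hr'
  have hm : PySem.Set.contains (PySem.Set.ofList (bzValid n k)) r = true := by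
    rw [PySem.Set.contains_iff, PySem.Set.mem_ofList]; exact hr
  unfold bzSums bzCostA
  rw [getD_foldl_guard_modify_add (PySem.List.pyRange 0 n 1)
        (fun j => PySem.Int.mod j (2*k+1))
        (fun m => PySem.Set.contains (PySem.Set.ofList (bzValid n k)) m)
        (fun j => PySem.List.pyGetD Cost j 0) PySem.Dict.empty r hm]
  rw [PySem.Dict.getD_empty, filter_mod_pyRange n (2*k+1) r hs hr'.1.1 (by omega)]
  rw [PySem.List.foldl_add]

theorem beautifulZeros_spec : Claim_equal_beautifulZeros := by
  intro n k Cost _ _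
  unfold Spec_beautifulZeros beautifulZeros beautifulZeros_alt
  by_cases hk : k < 0
  · rw [if_pos hk, PySem.List.pyRange_one_eq_nil (by omega : (k+1:Int) ≤ 0)]
    rfl
  · rw [if_neg hk]
    have hstep := PySem.List.foldl_ite_eq_foldl_filter
      (p := fun i => PySem.Int.mod (n - i - 1) (2*k+1) ≤ k)
      (f := fun (st : Option Int × Option Int) i => match st with
        | (none, _) => (some (bzCostA n k Cost i), some i)
        | (some r, sidx) =>
          (some (min r (bzCostA n k Cost i)),
           if min r (bzCostA n k Cost i) = bzCostA n k Cost i then some i else sidx))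
      (l := PySem.List.pyRange 0 (k+1) 1)
      (init := ((none, none) : Option Int × Option Int))
    refine hstep.trans ?_
    have hvalid : (PySem.List.pyRange 0 (k+1) 1).filter
        (fun i => decide (PySem.Int.mod (n - i - 1) (2*k+1) ≤ k)) = bzValid n k := rfl
    rw [hvalid]
    apply PySem.List.foldl_congr_mem
    intro acc r hr
    have hc := bzSums_getD n k Cost r hk hr
    obtain ⟨o, oi⟩ := acc
    cases o with
    | none =>
      dsimp only
      rw [hc]
    | some b =>
      dsimp only
      rw [hc]
      by_cases hcb : bzCostA n k Cost r ≤ b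
      · rw [if_pos hcb, min_eq_right hcb, if_pos rfl]
      · rw [if_neg hcb, min_eq_left (by omega), if_neg (by omega)]
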